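-- pv_equiv track=rewrite | github.com/twerppan/Resnet_test | MultiArmedBandit/bottleneck_select.py | find_critical_edges_dag
-- ===== SOURCE A (Python) =====
-- from collections import defaultdict, deque
--
-- def find_critical_edges_dag(edges):
--     in_degree = defaultdict(int)
--     out_degree = defaultdict(int)
--     nodes = set()
--     for u, v in edges:
--         out_degree[u] += 1
--         in_degree[v] += 1
--         nodes.add(u)
--         nodes.add(v)
--     sources = [n for n in nodes if in_degree[n] == 0]
--     sinks   = [n for n in nodes if out_degree[n] == 0]
--     if len(sources)!=1 or len(sinks)!=1:
--         raise ValueError("图必须包含且仅包含一个源和一个汇")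
--     source, sink = sources[0], sinks[0]
--     adj = defaultdict(list)
--     rev = defaultdict(list)
--     for u,v in edges:
--         adj[u].append(v)
--         rev[v].append(u)
--     topo, q, indeg = [], deque([source]), dict(in_degree)
--     while q:
--         u = q.popleft(); topo.append(u)
--         for v in adj[u]:
--             indeg[v] -= 1
--             if indeg[v]==0: q.append(v)
--     src_paths = defaultdict(int); src_paths[source]=1
--     for u in topo:
--         for v in adj[u]: src_paths[v]+=src_paths[u]
--     dest_paths = defaultdict(int); dest_paths[sink]=1
--     for u in reversed(topo):
--         for v in rev[u]: dest_paths[v]+=dest_paths[u]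
--     total = src_paths[sink]
--     critical=[]
--     for u,v in edges:
--         if src_paths[u]*dest_paths[v]==total:
--             critical.append((u,v))
--     return critical
-- ===== SOURCE B (Python) =====
-- from collections import defaultdict
--
-- def find_critical_edges_dag(edges):
--     # Same validation as the original: count degrees, demand one source and one sink.
--     in_degree = defaultdict(int)
--     out_degree = defaultdict(int)
--     nodes = set()
--     for u, v in edges:
--         out_degree[u] += 1
--         in_degree[v] += 1
--         nodes.add(u)
--         nodes.add(v)
--     sources = [n for n in nodes if in_degree[n] == 0]
--     sinks = [n for n in nodes if out_degree[n] == 0]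
--     if len(sources) != 1 or len(sinks) != 1:
--         raise ValueError("图必须包含且仅包含一个源和一个汇")
--     source, sink = sources[0], sinks[0]
--     n = len(nodes)
--     # Path counts by fixpoint iteration of the linear recurrence: no topological
--     # sort, no queue.  After k rounds src[v] counts the source->v paths of length
--     # < k+1; n rounds suffice on a DAG.
--     src = {source: 1}
--     for _ in range(n):
--         new = {}
--         for u, v in edges:
--             new[v] = new.get(v, 0) + src.get(u, 0)
--         new[source] = 1
--         src = new
--     dest = {sink: 1}
--     for _ in range(n):
--         new = {}
--         for u, v in edges:
--             new[u] = new.get(u, 0) + dest.get(v, 0)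
--         new[sink] = 1
--         dest = new
--     total = src.get(sink, 0)
--     return [(u, v) for u, v in edges
--             if src.get(u, 0) * dest.get(v, 0) == total]
-- ===== Notes on version B (the rewrite author's own statement) =====
-- stated objective: alternative
-- what changed: Replaces Kahn's queue-based topological sort and the two topologically-ordered DP sweeps by a fixpoint iteration of the path-count recurrence (len(nodes) rounds of relaxation over the raw edge list for src and dest counts); validation is unchanged, no topological order is ever computed.
-- outside the precondition, e.g. on find_critical_edges_dag([(2, 2), (2, 0), (6, 2)]): A returns [(2, 2), (6, 2)], B returns []
import Mathlib
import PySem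

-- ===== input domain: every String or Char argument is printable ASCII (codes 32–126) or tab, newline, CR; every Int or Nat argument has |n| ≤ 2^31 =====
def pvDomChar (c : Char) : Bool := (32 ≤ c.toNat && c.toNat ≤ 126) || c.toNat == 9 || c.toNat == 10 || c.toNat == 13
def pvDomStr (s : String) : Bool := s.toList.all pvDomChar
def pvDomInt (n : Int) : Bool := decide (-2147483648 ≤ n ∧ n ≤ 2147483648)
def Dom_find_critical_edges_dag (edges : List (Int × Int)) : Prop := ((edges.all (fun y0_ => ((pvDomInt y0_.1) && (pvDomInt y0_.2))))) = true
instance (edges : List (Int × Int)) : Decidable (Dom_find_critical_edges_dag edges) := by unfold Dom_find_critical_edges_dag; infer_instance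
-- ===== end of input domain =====

-- B replaces the topological sort + ordered DP of A by a fixpoint iteration of the
-- path-count recurrence (objective: alternative, not faster).  Equivalence is about the
-- return value; neither program mutates its argument.

-- ===== PORT A =====

-- shared first block of both Pythons: one loop filling in_degree, out_degree, nodes
def pvDegNodes (edges : List (Int × Int)) :
    PySem.Dict Int Int × PySem.Dict Int Int × PySem.Set Int :=
  edges.foldl (fun s e =>
      (s.1.modify e.2 0 (· + 1), s.2.1.modify e.1 0 (· + 1),
        PySem.Set.add (PySem.Set.add s.2.2 e.1) e.2))
    (PySem.Dict.empty, PySem.Dict.empty, PySem.Set.empty)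

-- the 'while q:' loop; fuel nodes.length + 2 is enough: each iteration pops one queue
-- element and every node is enqueued at most once (indeg reaches 0 at most once)
def pvKahn (adj : PySem.Dict Int (List Int)) :
    Nat → List Int × List Int × PySem.Dict Int Int → List Int × List Int × PySem.Dict Int Int
  | 0, s => s
  | fuel+1, (topo, q, indeg) =>
    match q with
    | [] => (topo, [], indeg)
    | u :: qrest =>
        -- topo.append(u); for v in adj[u]: indeg[v] -= 1; if indeg[v]==0: q.append(v)
        -- (indeg[v] -= 1 never hits a missing key in Python: v is always an edge target)
        let s2 := (adj.getD u []).foldl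
          (fun (s : List Int × PySem.Dict Int Int) v =>
            let ind2 := s.2.modify v 0 (· - 1)
            if ind2.getD v 0 == 0 then (s.1 ++ [v], ind2) else (s.1, ind2))
          (qrest, indeg)
        pvKahn adj fuel (topo ++ [u], s2.1, s2.2)

def find_critical_edges_dag (edges : List (Int × Int)) : List (Int × Int) :=
  let dn := pvDegNodes edges
  let in_degree := dn.1
  let out_degree := dn.2.1
  let nodes := dn.2.2
  let sources := nodes.filter (fun n => in_degree.getD n 0 == 0)
  let sinks := nodes.filter (fun n => out_degree.getD n 0 == 0)
  if sources.length = 1 ∧ sinks.length = 1 then   -- Python: if len!=1 or len!=1: raise ValueError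
    let source := sources.headD 0
    let sink := sinks.headD 0
    let adj := edges.foldl (fun d e => d.modify e.1 [] (· ++ [e.2]))
      (PySem.Dict.empty : PySem.Dict Int (List Int))
    let rev := edges.foldl (fun d e => d.modify e.2 [] (· ++ [e.1]))
      (PySem.Dict.empty : PySem.Dict Int (List Int))
    let res := pvKahn adj (nodes.length + 2) ([], [source], in_degree)
    let topo := res.1
    let src_paths := topo.foldl
      (fun d u => (adj.getD u []).foldl (fun d v => d.modify v 0 (· + d.getD u 0)) d)
      ((PySem.Dict.empty : PySem.Dict Int Int).insert source 1)
    let dest_paths := topo.reverse.foldl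
      (fun d u => (rev.getD u []).foldl (fun d v => d.modify v 0 (· + d.getD u 0)) d)
      ((PySem.Dict.empty : PySem.Dict Int Int).insert sink 1)
    let total := src_paths.getD sink 0
    edges.foldl (fun acc e =>
      if src_paths.getD e.1 0 * dest_paths.getD e.2 0 == total then acc ++ [e] else acc) []
  else []   -- Python raises ValueError here (outside Pre_)

-- ===== PORT B =====

-- 'for _ in range(k): s = body(s)'
def pvPow {α : Type} (f : α → α) : Nat → α → α
  | 0, s => s
  | k+1, s => pvPow f k (f s)

def find_critical_edges_dag_alt (edges : List (Int × Int)) : List (Int × Int) :=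
  let dn := pvDegNodes edges
  let in_degree := dn.1
  let out_degree := dn.2.1
  let nodes := dn.2.2
  let sources := nodes.filter (fun n => in_degree.getD n 0 == 0)
  let sinks := nodes.filter (fun n => out_degree.getD n 0 == 0)
  if sources.length = 1 ∧ sinks.length = 1 then
    let source := sources.headD 0
    let sink := sinks.headD 0
    let n := nodes.length
    let src := pvPow (fun s =>
        (edges.foldl (fun m e => m.insert e.2 (m.getD e.2 0 + s.getD e.1 0))
          (PySem.Dict.empty : PySem.Dict Int Int)).insert source 1) n
      ((PySem.Dict.empty : PySem.Dict Int Int).insert source 1)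
    let dest := pvPow (fun s =>
        (edges.foldl (fun m e => m.insert e.1 (m.getD e.1 0 + s.getD e.2 0))
          (PySem.Dict.empty : PySem.Dict Int Int)).insert sink 1) n
      ((PySem.Dict.empty : PySem.Dict Int Int).insert sink 1)
    let total := src.getD sink 0
    edges.filter (fun e => src.getD e.1 0 * dest.getD e.2 0 == total)
  else []

-- ===== PRECONDITION & SPEC =====

-- the distinct endpoints in first-insertion order (= the Pythons' `nodes` set)
def pvNodesOf (edges : List (Int × Int)) : List Int :=
  PySem.Set.ofList (edges.flatMap fun e => [e.1, e.2])

def pvSourcesOf (edges : List (Int × Int)) : List Int :=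
  (pvNodesOf edges).filter (fun n => (edges.map (·.2)).count n == 0)

def pvSinksOf (edges : List (Int × Int)) : List Int :=
  (pvNodesOf edges).filter (fun n => (edges.map (·.1)).count n == 0)

-- successors of u (with multiplicity, in edge order)
def pvSucc (edges : List (Int × Int)) (u : Int) : List Int :=
  (edges.filter (fun e => e.1 == u)).map (·.2)

-- 'v reachable from u by a path of at most k edges'
def pvReachN (edges : List (Int × Int)) : Nat → Int → Int → Bool
  | 0, u, v => u == v
  | k+1, u, v => u == v || (pvSucc edges u).any (fun w => pvReachN edges k w v)

-- no directed cycle (any cycle has length ≤ number of nodes ≤ 2*edges.length)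
def pvAcyclic (edges : List (Int × Int)) : Bool :=
  (pvNodesOf edges).all
    (fun v => !((pvSucc edges v).any (fun w => pvReachN edges (2 * edges.length) w v)))

-- Pre_ excludes (a) inputs where A raises ValueError (not exactly one source and one
-- sink) and (b) edge lists containing a directed cycle: the function is specified for
-- DAGs, and on cyclic input A's partially-propagated Kahn counts are an accidental
-- artefact of its implementation which B's fixpoint iteration does not reproduce.
def Pre_find_critical_edges_dag (edges : List (Int × Int)) : Prop :=
  (pvSourcesOf edges).length = 1 ∧ (pvSinksOf edges).length = 1 ∧ pvAcyclic edges = true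

instance (edges : List (Int × Int)) : Decidable (Pre_find_critical_edges_dag edges) := by
  unfold Pre_find_critical_edges_dag; infer_instance

def pvWitness_find_critical_edges_dag : List (Int × Int) :=
  [(1, 2), (1, 3), (2, 4), (3, 4)]

def Spec_find_critical_edges_dag (edges : List (Int × Int)) (out : List (Int × Int)) : Prop :=
  out = find_critical_edges_dag_alt edges

instance (edges : List (Int × Int)) (out : List (Int × Int)) :
    Decidable (Spec_find_critical_edges_dag edges out) := by
  unfold Spec_find_critical_edges_dag; infer_instance

-- ===== CLAIM (what is proved, stated in full; the proofs are below) =====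
def Claim_equal_find_critical_edges_dag : Prop :=
  ∀ (edges : List (Int × Int)), Dom_find_critical_edges_dag edges →
    Pre_find_critical_edges_dag edges →
    Spec_find_critical_edges_dag edges (find_critical_edges_dag edges)

-- ===== LEMMAS AND PROOFS =====


-- predecessors of v (with multiplicity, in edge order)
def predsE (E : List (Int × Int)) (v : Int) : List Int :=
  (E.filter (fun e => e.2 == v)).map (·.1)

lemma mem_succ_iff {E : List (Int × Int)} {u x : Int} : x ∈ pvSucc E u ↔ (u, x) ∈ E := by
  simp only [pvSucc, List.mem_map, List.mem_filter]
  constructor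
  · rintro ⟨⟨a, b⟩, ⟨hm, he⟩, rfl⟩
    simp only [beq_iff_eq] at he; subst he; exact hm
  · intro h; exact ⟨(u, x), ⟨h, by simp⟩, rfl⟩

lemma mem_preds_iff {E : List (Int × Int)} {v u : Int} : u ∈ predsE E v ↔ (u, v) ∈ E := by
  simp only [predsE, List.mem_map, List.mem_filter]
  constructor
  · rintro ⟨⟨a, b⟩, ⟨hm, he⟩, rfl⟩
    simp only [beq_iff_eq] at he; subst he; exact hm
  · intro h; exact ⟨(u, v), ⟨h, by simp⟩, rfl⟩

lemma count_succ_eq_countP (E : List (Int × Int)) (u v : Int) :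
    (pvSucc E u).count v = E.countP (fun e => e.1 == u && e.2 == v) := by
  simp only [pvSucc, List.count_eq_countP, List.countP_map, List.countP_filter]
  apply List.countP_congr
  intro e _; simp [Function.comp, Bool.and_comm]

lemma count_preds_eq_countP (E : List (Int × Int)) (v u : Int) :
    (predsE E v).count u = E.countP (fun e => e.1 == u && e.2 == v) := by
  simp only [predsE, List.count_eq_countP, List.countP_map, List.countP_filter]
  apply List.countP_congr
  intro e _; simp [Function.comp]

lemma count_succ_eq_count_preds (E : List (Int × Int)) (u v : Int) :
    (pvSucc E u).count v = (predsE E v).count u := by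
  rw [count_succ_eq_countP, count_preds_eq_countP]

lemma length_preds (E : List (Int × Int)) (v : Int) :
    (predsE E v).length = E.countP (fun e => e.2 == v) := by
  simp [predsE, List.countP_eq_length_filter]

lemma count_tgt_eq_length_preds (E : List (Int × Int)) (v : Int) :
    (E.map (·.2)).count v = (predsE E v).length := by
  rw [length_preds]
  simp only [List.count_eq_countP, List.countP_map, Function.comp_def]

lemma count_src_eq_length_succ (E : List (Int × Int)) (u : Int) :
    (E.map (·.1)).count u = (pvSucc E u).length := by
  simp only [pvSucc, List.length_map, List.count_eq_countP,
    List.countP_eq_length_filter, List.filter_map, List.length_map]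
  simp [Function.comp_def]

lemma mem_nodes_left {E : List (Int × Int)} {u v : Int} (h : (u, v) ∈ E) :
    u ∈ pvNodesOf E := by
  simp only [pvNodesOf, PySem.Set.mem_ofList, List.mem_flatMap]
  exact ⟨(u, v), h, by simp⟩

lemma mem_nodes_right {E : List (Int × Int)} {u v : Int} (h : (u, v) ∈ E) :
    v ∈ pvNodesOf E := by
  simp only [pvNodesOf, PySem.Set.mem_ofList, List.mem_flatMap]
  exact ⟨(u, v), h, by simp⟩

lemma nodes_nodup (E : List (Int × Int)) : (pvNodesOf E).Nodup :=
  PySem.Set.nodup_ofList _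

lemma nodes_length_le (E : List (Int × Int)) :
    (pvNodesOf E).length ≤ 2 * E.length := by
  have h3 : (E.flatMap fun e => [e.1, e.2]).length = 2 * E.length := by
    induction E with
    | nil => simp
    | cons e t ih =>
        rw [List.flatMap_cons, List.length_append, ih]
        simp; omega
  have h1 : List.Subperm (pvNodesOf E) (E.flatMap fun e => [e.1, e.2]) :=
    (nodes_nodup E).subperm (by
      intro x hx
      simpa only [pvNodesOf, PySem.Set.mem_ofList] using hx)
  have h2 := h1.length_le
  omega

-- ---- extraction of the shared first block ----

lemma degNodes_eq (edges : List (Int × Int)) :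
    pvDegNodes edges =
      (edges.foldl (fun d e => d.modify e.2 0 (· + 1)) PySem.Dict.empty,
       edges.foldl (fun d e => d.modify e.1 0 (· + 1)) PySem.Dict.empty,
       edges.foldl (fun s e => PySem.Set.add (PySem.Set.add s e.1) e.2) PySem.Set.empty) := by
  unfold pvDegNodes
  have h : ∀ (E : List (Int × Int)) (d1 d2 : PySem.Dict Int Int) (ns : PySem.Set Int),
      E.foldl (fun s e =>
          (s.1.modify e.2 0 (· + 1), s.2.1.modify e.1 0 (· + 1),
            PySem.Set.add (PySem.Set.add s.2.2 e.1) e.2)) (d1, d2, ns)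
        = (E.foldl (fun d e => d.modify e.2 0 (· + 1)) d1,
           E.foldl (fun d e => d.modify e.1 0 (· + 1)) d2,
           E.foldl (fun s e => PySem.Set.add (PySem.Set.add s e.1) e.2) ns) := by
    intro E
    induction E with
    | nil => intro d1 d2 ns; rfl
    | cons e t ih => intro d1 d2 ns; rw [List.foldl_cons]; exact ih _ _ _
  exact h edges _ _ _

lemma indeg_getD (edges : List (Int × Int)) (v : Int) :
    (pvDegNodes edges).1.getD v 0 = ((predsE edges v).length : Int) := by
  rw [degNodes_eq]
  dsimp only
  rw [← List.foldl_map (f := fun (e : Int × Int) => e.2)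
    (g := fun (d : PySem.Dict Int Int) x => d.modify x 0 (· + 1))]
  rw [PySem.Dict.getD_foldl_modify_add_one, count_tgt_eq_length_preds]
  simp [PySem.Dict.getD_empty]

lemma outdeg_getD (edges : List (Int × Int)) (u : Int) :
    (pvDegNodes edges).2.1.getD u 0 = ((pvSucc edges u).length : Int) := by
  rw [degNodes_eq]
  dsimp only
  rw [← List.foldl_map (f := fun (e : Int × Int) => e.1)
    (g := fun (d : PySem.Dict Int Int) x => d.modify x 0 (· + 1))]
  rw [PySem.Dict.getD_foldl_modify_add_one, count_src_eq_length_succ]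
  simp [PySem.Dict.getD_empty]

lemma nodes_set_eq (edges : List (Int × Int)) :
    (pvDegNodes edges).2.2 = pvNodesOf edges := by
  rw [degNodes_eq]
  dsimp only
  rw [pvNodesOf, PySem.Set.ofList_eq_foldl]
  have h : ∀ (E : List (Int × Int)) (s : PySem.Set Int),
      (E.flatMap fun e => [e.1, e.2]).foldl PySem.Set.add s
        = E.foldl (fun s e => PySem.Set.add (PySem.Set.add s e.1) e.2) s := by
    intro E
    induction E with
    | nil => intro s; rfl
    | cons e t ih =>
        intro s
        rw [List.flatMap_cons, List.foldl_append, List.foldl_cons, ih]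
        rfl
  exact (h edges _).symm

lemma sources_eq (edges : List (Int × Int)) :
    ((pvDegNodes edges).2.2).filter (fun n => (pvDegNodes edges).1.getD n 0 == 0)
      = pvSourcesOf edges := by
  rw [nodes_set_eq, pvSourcesOf]
  apply List.filter_congr
  intro n _
  rw [indeg_getD, ← count_tgt_eq_length_preds]
  cases h : (edges.map (·.2)).count n == 0 <;> simp_all

lemma sinks_eq (edges : List (Int × Int)) :
    ((pvDegNodes edges).2.2).filter (fun n => (pvDegNodes edges).2.1.getD n 0 == 0)
      = pvSinksOf edges := by
  rw [nodes_set_eq, pvSinksOf]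
  apply List.filter_congr
  intro n _
  rw [outdeg_getD, ← count_src_eq_length_succ]
  cases h : (edges.map (·.1)).count n == 0 <;> simp_all

lemma adj_getD (edges : List (Int × Int)) (u : Int) :
    (edges.foldl (fun d e => d.modify e.1 [] (· ++ [e.2]))
      (PySem.Dict.empty : PySem.Dict Int (List Int))).getD u [] = pvSucc edges u := by
  rw [PySem.Dict.getD_foldl_modify_append]
  simp [pvSucc, PySem.Dict.getD_empty]

lemma rev_getD (edges : List (Int × Int)) (v : Int) :
    (edges.foldl (fun d e => d.modify e.2 [] (· ++ [e.1]))
      (PySem.Dict.empty : PySem.Dict Int (List Int))).getD v [] = predsE edges v := by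
  rw [show (fun (d : PySem.Dict Int (List Int)) (e : Int × Int) => d.modify e.2 [] (· ++ [e.1]))
      = (fun d e => d.modify (e.2, e.1).1 [] (· ++ [(e.2, e.1).2])) from rfl,
    ← List.foldl_map (f := fun (e : Int × Int) => (e.2, e.1))
      (g := fun (d : PySem.Dict Int (List Int)) (p : Int × Int) => d.modify p.1 [] (· ++ [p.2]))]
  rw [PySem.Dict.getD_foldl_modify_append]
  simp only [PySem.Dict.getD_empty, List.nil_append, List.filter_map, List.map_map]
  rfl

-- ---- counting lemmas ----

lemma sum_map_count_cons (l : List Int) (x : Int) (ms : List Int) :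
    (l.map (fun u => ((x :: ms).count u))).sum
      = (l.map (fun u => ms.count u)).sum + l.count x := by
  induction l with
  | nil => simp
  | cons u l' ih =>
      rw [List.map_cons, List.map_cons, List.sum_cons, List.sum_cons, ih]
      have h1 : (x :: ms).count u = ms.count u + if u = x then 1 else 0 := by
        rw [List.count_cons]
        by_cases h : u = x
        · subst h; simp
        · simp [h, Ne.symm h]
      have h2 : (u :: l').count x = l'.count x + if u = x then 1 else 0 := by
        rw [List.count_cons]
        by_cases h : u = x
        · subst h; simp
        · simp [h]
      rw [h1, h2]
      omega

lemma sum_counts_nodup (ms l : List Int) (hl : l.Nodup) :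
    (l.map (fun u => ms.count u)).sum = (ms.filter (fun x => decide (x ∈ l))).length := by
  induction ms with
  | nil => simp
  | cons x ms' ih =>
      rw [sum_map_count_cons, ih]
      rw [List.nodup_iff_count_le_one] at hl
      by_cases hx : x ∈ l
      · have h1 : 0 < l.count x := List.count_pos_iff.mpr hx
        have h2 := hl x
        simp [hx]; omega
      · have h1 : l.count x = 0 := List.count_eq_zero.mpr hx
        simp [hx, h1]

lemma sum_succ_le (E : List (Int × Int)) (v : Int) (l : List Int) (hl : l.Nodup) :
    (l.map (fun u => ((pvSucc E u).count v))).sum ≤ (predsE E v).length := by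
  have h : (l.map (fun u => ((pvSucc E u).count v)))
      = (l.map (fun u => (predsE E v).count u)) :=
    List.map_congr_left (fun u _ => count_succ_eq_count_preds E u v)
  rw [h, sum_counts_nodup _ _ hl]
  exact List.length_filter_le _ _

lemma preds_sub_of_sum_eq (E : List (Int × Int)) (v : Int) (l : List Int) (hl : l.Nodup)
    (h : (l.map (fun u => ((pvSucc E u).count v))).sum = (predsE E v).length) :
    ∀ u ∈ predsE E v, u ∈ l := by
  have h2 : (l.map (fun u => ((pvSucc E u).count v)))
      = (l.map (fun u => (predsE E v).count u)) :=
    List.map_congr_left (fun u _ => count_succ_eq_count_preds E u v)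
  rw [h2, sum_counts_nodup _ _ hl] at h
  intro u hu
  have := List.length_filter_eq_length_iff.mp h u hu
  simpa using this

lemma sum_eq_of_preds_sub (E : List (Int × Int)) (v : Int) (l : List Int) (hl : l.Nodup)
    (h : ∀ u ∈ predsE E v, u ∈ l) :
    (l.map (fun u => ((pvSucc E u).count v))).sum = (predsE E v).length := by
  have h2 : (l.map (fun u => ((pvSucc E u).count v)))
      = (l.map (fun u => (predsE E v).count u)) :=
    List.map_congr_left (fun u _ => count_succ_eq_count_preds E u v)
  rw [h2, sum_counts_nodup _ _ hl]
  rw [List.filter_eq_self.mpr (by intro u hu; simpa using h u hu)]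

-- ---- the inner 'for v in adj[u]' loop of the Kahn while-loop ----

lemma decFold_getD (L : List Int) (d : PySem.Dict Int Int) (v : Int) :
    (L.foldl (fun dd w => dd.modify w 0 (· - 1)) d).getD v 0
      = d.getD v 0 - (L.count v : Int) := by
  induction L generalizing d with
  | nil => simp
  | cons x L' ih =>
      rw [List.foldl_cons, ih, PySem.Dict.getD_modify, List.count_cons]
      by_cases h : v = x
      · subst h; simp; omega
      · have h' : ¬ x = v := fun hh => h hh.symm
        simp [h, h']

lemma innerFold (L : List Int) (qr : List Int) (d : PySem.Dict Int Int)
    (Hge : ∀ v ∈ L, (L.count v : Int) ≤ d.getD v 0) :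
    ∃ nw : List Int,
      (L.foldl (fun (s : List Int × PySem.Dict Int Int) v =>
          let ind2 := s.2.modify v 0 (· - 1)
          if ind2.getD v 0 == 0 then (s.1 ++ [v], ind2) else (s.1, ind2)) (qr, d))
        = (qr ++ nw, L.foldl (fun dd w => dd.modify w 0 (· - 1)) d)
      ∧ nw.Nodup
      ∧ (∀ v, v ∈ nw ↔ (v ∈ L ∧ d.getD v 0 = (L.count v : Int))) := by
  induction L generalizing qr d with
  | nil => exact ⟨[], by simp, List.nodup_nil, by simp⟩
  | cons x L' ih =>
      have hcx : 0 < (x :: L').count x := List.count_pos_iff.mpr (by simp)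
      have hx1 : (1 : Int) ≤ d.getD x 0 := by
        have := Hge x (by simp)
        omega
      have hd1 : (d.modify x 0 (· - 1)).getD x 0 = d.getD x 0 - 1 :=
        PySem.Dict.getD_modify_self _ _ _ _
      have hcount : ∀ v : Int, (x :: L').count v = L'.count v + (if v = x then 1 else 0) := by
        intro v
        rw [List.count_cons]
        by_cases h : v = x
        · subst h; simp
        · simp [h, Ne.symm h]
      have hge' : ∀ v ∈ L', (L'.count v : Int) ≤ (d.modify x 0 (· - 1)).getD v 0 := by
        intro v hv
        rw [PySem.Dict.getD_modify]
        have := Hge v (by simp [hv])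
        rw [hcount v] at this
        by_cases h : v = x <;> simp [h] <;> push_cast at this <;> simp [h] at this <;> omega
      by_cases hc : d.getD x 0 = 1
      · -- indeg[x] hits 0: x is appended to the queue
        obtain ⟨nw', heq, hnd, hmem⟩ := ih (qr ++ [x]) (d.modify x 0 (· - 1)) hge'
        have hxL' : x ∉ L' := by
          intro hmem'
          have h1 := Hge x (by simp)
          have h2 : 0 < L'.count x := List.count_pos_iff.mpr hmem'
          rw [hcount x] at h1
          simp at h1
          omega
        have hcond : ((d.modify x 0 (· - 1)).getD x 0 == 0) = true := by
          rw [hd1, hc]; simp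
        refine ⟨x :: nw', ?_, ?_, ?_⟩
        · rw [List.foldl_cons]
          show (L'.foldl _ (if ((d.modify x 0 (· - 1)).getD x 0 == 0) = true
              then (qr ++ [x], d.modify x 0 (· - 1)) else (qr, d.modify x 0 (· - 1)))) = _
          rw [if_pos hcond, heq, List.append_assoc]
          rfl
        · refine List.nodup_cons.mpr ⟨?_, hnd⟩
          intro hx
          exact hxL' ((hmem x).mp hx).1
        · intro v
          constructor
          · intro hv
            rcases List.mem_cons.mp hv with rfl | hv'
            · refine ⟨by simp, ?_⟩
              rw [hcount v]
              have h0 : L'.count v = 0 := List.count_eq_zero.mpr hxL'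
              simp [h0, hc]
            · obtain ⟨h1, h2⟩ := (hmem v).mp hv'
              have hvx : ¬ v = x := fun h => hxL' (h ▸ h1)
              rw [PySem.Dict.getD_modify, if_neg hvx] at h2
              refine ⟨by simp [h1], ?_⟩
              rw [hcount v, if_neg hvx]
              simpa using h2
          · rintro ⟨hv1, hv2⟩
            by_cases hvx : v = x
            · simp [hvx]
            · rcases List.mem_cons.mp hv1 with h | h
              · exact absurd h hvx
              · refine List.mem_cons.mpr (Or.inr ((hmem v).mpr ⟨h, ?_⟩))
                rw [PySem.Dict.getD_modify, if_neg hvx]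
                rw [hcount v, if_neg hvx] at hv2
                simpa using hv2
      · -- indeg[x] stays positive
        obtain ⟨nw', heq, hnd, hmem⟩ := ih qr (d.modify x 0 (· - 1)) hge'
        have hcond : ¬ (((d.modify x 0 (· - 1)).getD x 0 == 0) = true) := by
          rw [hd1]; simp; omega
        refine ⟨nw', ?_, hnd, ?_⟩
        · rw [List.foldl_cons]
          show (L'.foldl _ (if ((d.modify x 0 (· - 1)).getD x 0 == 0) = true
              then (qr ++ [x], d.modify x 0 (· - 1)) else (qr, d.modify x 0 (· - 1)))) = _
          rw [if_neg hcond, heq]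
          rfl
        · intro v
          rw [hmem v]
          constructor
          · rintro ⟨h1, h2⟩
            rw [PySem.Dict.getD_modify] at h2
            by_cases hvx : v = x
            · subst hvx
              rw [if_pos rfl] at h2
              refine ⟨by simp, ?_⟩
              rw [hcount v, if_pos rfl]
              push_cast
              omega
            · rw [if_neg hvx] at h2
              refine ⟨by simp [h1], ?_⟩
              rw [hcount v, if_neg hvx]
              simpa using h2
          · rintro ⟨h1, h2⟩
            by_cases hvx : v = x
            · subst hvx
              rw [hcount v, if_pos rfl] at h2
              push_cast at h2
              have hxl : v ∈ L' := by
                apply List.count_pos_iff.mp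
                omega
              refine ⟨hxl, ?_⟩
              rw [PySem.Dict.getD_modify, if_pos rfl]
              omega
            · rcases List.mem_cons.mp h1 with h | h
              · exact absurd h hvx
              · refine ⟨h, ?_⟩
                rw [PySem.Dict.getD_modify, if_neg hvx]
                rw [hcount v, if_neg hvx] at h2
                simpa using h2

-- ---- the Kahn while-loop invariant ----

def pvKInv (E : List (Int × Int)) (topo q : List Int) (indeg : PySem.Dict Int Int) : Prop :=
  (topo ++ q).Nodup ∧
  (∀ v ∈ topo ++ q, v ∈ pvNodesOf E) ∧
  (∀ v : Int, indeg.getD v 0 =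
      ((predsE E v).length : Int) - ((topo.map (fun u => (pvSucc E u).count v)).sum : Int)) ∧
  (∀ v ∈ q, indeg.getD v 0 = 0) ∧
  (∀ v : Int, v ∈ topo ++ q ↔ (v ∈ pvNodesOf E ∧ indeg.getD v 0 = 0)) ∧
  (∀ i, (h : i < topo.length) → ∀ u ∈ predsE E (topo[i]), u ∈ topo.take i)

lemma kinv_preds_topo {E : List (Int × Int)} {topo q : List Int} {indeg : PySem.Dict Int Int}
    (hinv : pvKInv E topo q indeg) :
    ∀ v ∈ topo ++ q, ∀ w ∈ predsE E v, w ∈ topo := by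
  obtain ⟨hnd, _, h3, _, h5, _⟩ := hinv
  intro v hv w hw
  have h0 : indeg.getD v 0 = 0 := ((h5 v).mp hv).2
  rw [h3 v] at h0
  have htn : topo.Nodup := (List.nodup_append.mp hnd).1
  apply preds_sub_of_sum_eq E v topo htn _ w hw
  omega

lemma kinv_step (E : List (Int × Int)) (topo qrest : List Int) (indeg : PySem.Dict Int Int)
    (u : Int) (hinv : pvKInv E topo (u :: qrest) indeg) :
    ∃ nw : List Int,
      ((pvSucc E u).foldl (fun (s : List Int × PySem.Dict Int Int) v =>
          let ind2 := s.2.modify v 0 (· - 1)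
          if ind2.getD v 0 == 0 then (s.1 ++ [v], ind2) else (s.1, ind2)) (qrest, indeg))
        = (qrest ++ nw, (pvSucc E u).foldl (fun dd w => dd.modify w 0 (· - 1)) indeg)
      ∧ pvKInv E (topo ++ [u]) (qrest ++ nw)
          ((pvSucc E u).foldl (fun dd w => dd.modify w 0 (· - 1)) indeg) := by
  obtain ⟨hnd, h2, h3, h4, h5, h6⟩ := hinv
  have hpt : ∀ v ∈ topo ++ u :: qrest, ∀ w ∈ predsE E v, w ∈ topo :=
    kinv_preds_topo ⟨hnd, h2, h3, h4, h5, h6⟩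
  have htn : topo.Nodup := (List.nodup_append.mp hnd).1
  have hutopo : u ∉ topo := by
    have hdisj := (List.nodup_append.mp hnd).2.2
    intro hu
    exact hdisj u hu u (by simp) rfl
  have htun : (topo ++ [u]).Nodup := by
    rw [List.nodup_append]
    refine ⟨htn, List.nodup_singleton u, ?_⟩
    intro a ha b hb hab
    simp at hb
    subst hb
    subst hab
    exact hutopo ha
  -- members of topo ∪ q are not successors of u
  have hnotL : ∀ v ∈ topo ++ u :: qrest, v ∉ pvSucc E u := by
    intro v hv hvL
    have hu_pred : u ∈ predsE E v := mem_preds_iff.mpr (mem_succ_iff.mp hvL)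
    exact hutopo (hpt v hv u hu_pred)
  have hcountL : ∀ v ∈ topo ++ u :: qrest, (pvSucc E u).count v = 0 := by
    intro v hv
    exact List.count_eq_zero.mpr (hnotL v hv)
  -- precondition of the inner-loop lemma
  have hsum_tu : ∀ v : Int,
      ((topo ++ [u]).map (fun w => (pvSucc E w).count v)).sum
        = (topo.map (fun w => (pvSucc E w).count v)).sum + (pvSucc E u).count v := by
    intro v
    rw [List.map_append, List.sum_append]
    simp
  have hge : ∀ v ∈ pvSucc E u, ((pvSucc E u).count v : Int) ≤ indeg.getD v 0 := by
    intro v hv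
    rw [h3 v]
    have hle := sum_succ_le E v (topo ++ [u]) htun
    rw [hsum_tu v] at hle
    omega
  obtain ⟨nw, heq, hnwnd, hnwmem⟩ := innerFold (pvSucc E u) qrest indeg hge
  have hdec : ∀ v : Int,
      ((pvSucc E u).foldl (fun dd w => dd.modify w 0 (· - 1)) indeg).getD v 0
        = indeg.getD v 0 - ((pvSucc E u).count v : Int) :=
    fun v => decFold_getD _ _ _
  -- new-element facts
  have hnw_fresh : ∀ v ∈ nw, v ∉ topo ++ u :: qrest ∧ v ∈ pvNodesOf E := by
    intro v hv
    obtain ⟨hvL, hveq⟩ := (hnwmem v).mp hv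
    have hcpos : 0 < (pvSucc E u).count v := List.count_pos_iff.mpr hvL
    constructor
    · intro hvin
      have := hcountL v hvin
      omega
    · exact mem_nodes_right (mem_succ_iff.mp hvL)
  refine ⟨nw, heq, ?_, ?_, ?_, ?_, ?_, ?_⟩
  · -- Nodup
    have hrearr : topo ++ u :: qrest = topo ++ [u] ++ qrest := by
      rw [List.append_assoc]; rfl
    have hassoc : (topo ++ [u]) ++ (qrest ++ nw) = ((topo ++ [u]) ++ qrest) ++ nw := by
      simp [List.append_assoc]
    rw [hassoc, List.nodup_append]
    refine ⟨hrearr ▸ hnd, hnwnd, ?_⟩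
    intro a ha b hb hab
    subst hab
    rw [← hrearr] at ha
    exact (hnw_fresh a hb).1 ha
  · -- membership in nodes
    intro v hv
    rcases List.mem_append.mp hv with h | h
    · rcases List.mem_append.mp h with h' | h'
      · exact h2 v (List.mem_append_left _ h')
      · simp at h'
        exact h2 v (by simp [h'])
    · rcases List.mem_append.mp h with h' | h'
      · exact h2 v (by simp [h'])
      · exact (hnw_fresh v h').2
  · -- indeg value equation
    intro v
    rw [hdec v, h3 v, hsum_tu v]
    push_cast
    omega
  · -- queue members have indeg 0
    intro v hv
    rw [hdec v]
    rcases List.mem_append.mp hv with h | h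
    · rw [hcountL v (by simp [h])]
      have := h4 v (by simp [h])
      simp [this]
    · obtain ⟨_, hveq⟩ := (hnwmem v).mp h
      omega
  · -- characterisation of processed ∪ pending
    intro v
    constructor
    · intro hv
      rw [hdec v]
      rcases List.mem_append.mp hv with h | h
      · rcases List.mem_append.mp h with h' | h'
        · have hold : v ∈ topo ++ u :: qrest := List.mem_append_left _ h'
          refine ⟨h2 v hold, ?_⟩
          rw [hcountL v hold]
          have := ((h5 v).mp hold).2
          simp [this]
        · simp at h'
          have hold : v ∈ topo ++ u :: qrest := by simp [h']
          refine ⟨h2 v hold, ?_⟩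
          rw [hcountL v hold]
          have := ((h5 v).mp hold).2
          simp [this]
      · rcases List.mem_append.mp h with h' | h'
        · have hold : v ∈ topo ++ u :: qrest := by simp [h']
          refine ⟨h2 v hold, ?_⟩
          rw [hcountL v hold]
          have := ((h5 v).mp hold).2
          simp [this]
        · obtain ⟨_, hveq⟩ := (hnwmem v).mp h'
          exact ⟨(hnw_fresh v h').2, by omega⟩
    · rintro ⟨hvn, hv0⟩
      rw [hdec v] at hv0
      by_cases hvL : v ∈ pvSucc E u
      · have : v ∈ nw := (hnwmem v).mpr ⟨hvL, by omega⟩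
        simp [this]
      · have hc0 : (pvSucc E u).count v = 0 := List.count_eq_zero.mpr hvL
        rw [hc0] at hv0
        simp at hv0
        have := (h5 v).mpr ⟨hvn, hv0⟩
        rcases List.mem_append.mp this with h | h
        · simp [h]
        · rcases List.mem_cons.mp h with h' | h'
          · subst h'
            simp
          · simp [h']
  · -- order property
    intro i hi w hw
    rw [List.length_append, List.length_singleton] at hi
    by_cases hlt : i < topo.length
    · rw [List.getElem_append_left hlt] at hw
      rw [List.take_append_of_le_length (by omega)]
      exact h6 i hlt w hw
    · have hieq : i = topo.length := by omega
      subst hieq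
      have hgu : (topo ++ [u])[topo.length]'(by simp) = u :=
        List.getElem_concat_length rfl (by simp)
      rw [hgu] at hw
      rw [List.take_append_of_le_length (by omega), List.take_of_length_le (by omega)]
      exact hpt u (by simp) w hw

lemma kinv_topo_le (E : List (Int × Int)) {topo q : List Int} {indeg : PySem.Dict Int Int}
    (hinv : pvKInv E topo q indeg) : topo.length ≤ (pvNodesOf E).length := by
  obtain ⟨hnd, h2, _⟩ := hinv
  have htn : topo.Nodup := (List.nodup_append.mp hnd).1
  exact (htn.subperm (fun x hx => h2 x (List.mem_append_left _ hx))).length_le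

lemma kahn_go (E : List (Int × Int)) (adj : PySem.Dict Int (List Int))
    (hadj : ∀ u, adj.getD u [] = pvSucc E u) :
    ∀ (fuel : Nat) (topo q : List Int) (indeg : PySem.Dict Int Int),
      pvKInv E topo q indeg → (pvNodesOf E).length + 1 ≤ fuel + topo.length →
      ∃ topoF indegF, pvKahn adj fuel (topo, q, indeg) = (topoF, [], indegF)
        ∧ pvKInv E topoF [] indegF := by
  intro fuel
  induction fuel with
  | zero =>
      intro topo q indeg hinv hfuel
      exfalso
      have hle := kinv_topo_le E hinv
      omega
  | succ fuel ih =>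
      intro topo q indeg hinv hfuel
      cases q with
      | nil => exact ⟨topo, indeg, by simp [pvKahn], hinv⟩
      | cons u qrest =>
          obtain ⟨nw, heq, hinv'⟩ := kinv_step E topo qrest indeg u hinv
          have hstep : pvKahn adj (fuel+1) (topo, u :: qrest, indeg)
              = pvKahn adj fuel (topo ++ [u], qrest ++ nw,
                  (pvSucc E u).foldl (fun dd w => dd.modify w 0 (· - 1)) indeg) := by
            show pvKahn adj fuel (topo ++ [u],
              ((adj.getD u []).foldl (fun (s : List Int × PySem.Dict Int Int) v =>
                  let ind2 := s.2.modify v 0 (· - 1)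
                  if ind2.getD v 0 == 0 then (s.1 ++ [v], ind2) else (s.1, ind2))
                (qrest, indeg)).1,
              ((adj.getD u []).foldl (fun (s : List Int × PySem.Dict Int Int) v =>
                  let ind2 := s.2.modify v 0 (· - 1)
                  if ind2.getD v 0 == 0 then (s.1 ++ [v], ind2) else (s.1, ind2))
                (qrest, indeg)).2) = _
            rw [hadj u, heq]
          rw [hstep]
          apply ih _ _ _ hinv'
          rw [List.length_append, List.length_singleton]
          omega

-- ---- initial state of the while-loop ----

lemma mem_sources_iff (E : List (Int × Int)) (v : Int) :
    v ∈ pvSourcesOf E ↔ (v ∈ pvNodesOf E ∧ (predsE E v).length = 0) := by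
  rw [pvSourcesOf, List.mem_filter]
  constructor
  · rintro ⟨h1, h2⟩
    rw [count_tgt_eq_length_preds] at h2
    exact ⟨h1, by simpa using h2⟩
  · rintro ⟨h1, h2⟩
    refine ⟨h1, ?_⟩
    rw [count_tgt_eq_length_preds]
    simpa using h2

lemma kinv_init (E : List (Int × Int)) (src : Int) (hsrc : pvSourcesOf E = [src]) :
    pvKInv E [] [src] (pvDegNodes E).1 := by
  have hsm : src ∈ pvSourcesOf E := by rw [hsrc]; simp
  obtain ⟨hsn, hs0⟩ := (mem_sources_iff E src).mp hsm
  refine ⟨by simp, ?_, ?_, ?_, ?_, ?_⟩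
  · intro v hv
    simp at hv
    subst hv
    exact hsn
  · intro v
    rw [indeg_getD]
    simp
  · intro v hv
    simp at hv
    subst hv
    rw [indeg_getD, hs0]
    simp
  · intro v
    simp only [List.nil_append, List.mem_singleton]
    constructor
    · intro hv
      subst hv
      rw [indeg_getD, hs0]
      exact ⟨hsn, by simp⟩
    · rintro ⟨h1, h2⟩
      rw [indeg_getD] at h2
      have : v ∈ pvSourcesOf E := (mem_sources_iff E v).mpr ⟨h1, by omega⟩
      rw [hsrc] at this
      simpa using this
  · intro i hi
    simp at hi

-- ---- completeness of the final topo list (uses acyclicity) ----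

lemma reachN_mono (E : List (Int × Int)) :
    ∀ k k' : Nat, k ≤ k' → ∀ u v : Int, pvReachN E k u v = true → pvReachN E k' u v = true := by
  intro k
  induction k with
  | zero =>
      intro k' _ u v h
      simp [pvReachN] at h
      cases k' with
      | zero => simp [pvReachN, h]
      | succ k'' => simp [pvReachN, h]
  | succ k ih =>
      intro k' hk u v h
      cases k' with
      | zero => omega
      | succ k'' =>
          simp only [pvReachN, Bool.or_eq_true, List.any_eq_true] at h ⊢
          rcases h with h | ⟨w, hw, hr⟩
          · exact Or.inl h
          · exact Or.inr ⟨w, hw, ih k'' (by omega) w v hr⟩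

lemma iterate_mem (U : List Int) (g : Int → Int) (hg : ∀ y ∈ U, g y ∈ U) :
    ∀ (d : Nat) (y : Int), y ∈ U → g^[d] y ∈ U := by
  intro d
  induction d with
  | zero => intro y hy; simpa using hy
  | succ d ih =>
      intro y hy
      rw [Function.iterate_succ_apply]
      exact ih (g y) (hg y hy)

lemma reachN_iterate (E : List (Int × Int)) (U : List Int) (g : Int → Int)
    (hg : ∀ y ∈ U, g y ∈ U ∧ (g y, y) ∈ E) :
    ∀ (d : Nat) (y : Int), y ∈ U → pvReachN E d (g^[d] y) y = true := by
  intro d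
  induction d with
  | zero => intro y hy; simp [pvReachN]
  | succ d ih =>
      intro y hy
      rw [Function.iterate_succ_apply']
      have hz : g^[d] y ∈ U := iterate_mem U g (fun y hy => (hg y hy).1) d y hy
      have hedge : (g (g^[d] y), g^[d] y) ∈ E := (hg _ hz).2
      simp only [pvReachN, Bool.or_eq_true, List.any_eq_true]
      exact Or.inr ⟨g^[d] y, mem_succ_iff.mpr hedge, ih y hy⟩

lemma kinv_complete (E : List (Int × Int)) {topoF : List Int} {indegF : PySem.Dict Int Int}
    (hacyc : pvAcyclic E = true) (hinv : pvKInv E topoF [] indegF) :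
    ∀ v ∈ pvNodesOf E, v ∈ topoF := by
  by_contra hcon
  obtain ⟨v0, hv0n, hv0t⟩ : ∃ v0, v0 ∈ pvNodesOf E ∧ v0 ∉ topoF := by
    by_contra hall
    exact hcon (fun v hv => by
      by_contra hvt
      exact hall ⟨v, hv, hvt⟩)
  set U : List Int := (pvNodesOf E).filter (fun x => !decide (x ∈ topoF)) with hU
  have hUmem : ∀ x : Int, x ∈ U ↔ (x ∈ pvNodesOf E ∧ x ∉ topoF) := by
    intro x
    rw [hU, List.mem_filter]
    simp
  have hv0U : v0 ∈ U := (hUmem v0).mpr ⟨hv0n, hv0t⟩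
  obtain ⟨hnd, h2, h3, _, h5, h6⟩ := hinv
  have htn : topoF.Nodup := by simpa using hnd
  -- every member of U has a predecessor in U
  have hpred : ∀ v ∈ U, ∃ u ∈ U, (u, v) ∈ E := by
    intro v hv
    obtain ⟨hvn, hvt⟩ := (hUmem v).mp hv
    have hne : indegF.getD v 0 ≠ 0 := by
      intro h0
      exact hvt (by simpa using (h5 v).mpr ⟨hvn, h0⟩)
    rw [h3 v] at hne
    obtain ⟨u, hu1, hu2⟩ : ∃ u, u ∈ predsE E v ∧ u ∉ topoF := by
      by_contra hall
      have hsub : ∀ u ∈ predsE E v, u ∈ topoF := by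
        intro u hu
        by_contra hut
        exact hall ⟨u, hu, hut⟩
      exact hne (by rw [sum_eq_of_preds_sub E v topoF htn hsub]; simp)
    refine ⟨u, (hUmem u).mpr ⟨mem_nodes_left (mem_preds_iff.mp hu1), hu2⟩,
      mem_preds_iff.mp hu1⟩
  -- choice of a predecessor
  set g : Int → Int := fun v => ((U.find? (fun u => decide ((u, v) ∈ E))).getD v) with hgdef
  have hg : ∀ y ∈ U, g y ∈ U ∧ (g y, y) ∈ E := by
    intro y hy
    obtain ⟨u, hu1, hu2⟩ := hpred y hy
    have hsome : (U.find? (fun u => decide ((u, y) ∈ E))).isSome := by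
      rw [List.find?_isSome]
      exact ⟨u, hu1, by simpa using hu2⟩
    obtain ⟨u', hu'⟩ := Option.isSome_iff_exists.mp hsome
    have hmem' : u' ∈ U := List.mem_of_find?_eq_some hu'
    have hpred' : ((u', y) ∈ E) := by simpa using List.find?_some hu'
    rw [hgdef]
    simp only [hu', Option.getD_some]
    exact ⟨hmem', hpred'⟩
  -- pigeonhole on the iterates of g
  have hUnd : U.Nodup := List.Nodup.filter _ (nodes_nodup E)
  have hcard : (U.toFinset).card = U.length := List.toFinset_card_of_nodup hUnd
  have hmapsto : ∀ i : Fin (U.length + 1), (i : Nat) ∈ Finset.range (U.length + 1) →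
      g^[(i : Nat)] v0 ∈ U.toFinset := by
    intro i _
    rw [List.mem_toFinset]
    exact iterate_mem U g (fun y hy => (hg y hy).1) _ v0 hv0U
  have hlt : (U.toFinset).card < (Finset.range (U.length + 1)).card := by
    rw [hcard, Finset.card_range]
    omega
  obtain ⟨i, hi, j, hj, hij, hfij⟩ :=
    Finset.exists_ne_map_eq_of_card_lt_of_maps_to hlt
      (fun (a : Nat) (ha : a ∈ Finset.range (U.length + 1)) =>
        (by
          rw [List.mem_toFinset]
          exact iterate_mem U g (fun y hy => (hg y hy).1) a v0 hv0U :
          g^[a] v0 ∈ U.toFinset))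
  have key : ∀ a b : Nat, a < b → b ≤ U.length → g^[a] v0 = g^[b] v0 → False := by
    intro a b hab hble hfeq
    set w : Int := g^[a] v0 with hw
    have hwU : w ∈ U := iterate_mem U g (fun y hy => (hg y hy).1) a v0 hv0U
    have hiter : g^[b - a] w = w := by
      rw [hw, ← Function.iterate_add_apply]
      rw [show b - a + a = b from by omega]
      exact hfeq.symm
    have hzU : g w ∈ U := (hg w hwU).1
    have hwsucc : w ∈ pvSucc E (g w) := mem_succ_iff.mpr (hg w hwU).2
    have hd : g^[b - a - 1] (g w) = w := by
      rw [← Function.iterate_succ_apply]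
      rw [show (b - a - 1).succ = b - a from by omega]
      exact hiter
    have hreach : pvReachN E (b - a - 1) w (g w) = true := by
      have := reachN_iterate E U g hg (b - a - 1) (g w) hzU
      rwa [hd] at this
    have hreach' : pvReachN E (2 * E.length) w (g w) = true := by
      refine reachN_mono E _ _ ?_ _ _ hreach
      have h1 : U.length ≤ (pvNodesOf E).length := List.length_filter_le _ _
      have h2 := nodes_length_le E
      omega
    have hzn : g w ∈ pvNodesOf E := ((hUmem (g w)).mp hzU).1
    have := (List.all_eq_true.mp hacyc) (g w) hzn
    simp only [Bool.not_eq_eq_eq_not, Bool.not_true, List.any_eq_false] at this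
    exact absurd hreach' (by simpa using this w hwsucc)
  rw [Finset.mem_range] at hi hj
  rcases Nat.lt_or_ge i j with h | h
  · exact key i j h (by omega) hfij
  · exact key j i (by omega) (by omega) hfij.symm

-- ---- A's two DP sweeps: push-DP over a topologically sorted list ----

def pushF (a : Int → List Int) (d : PySem.Dict Int Int) (l : List Int) : PySem.Dict Int Int :=
  l.foldl (fun d u => (a u).foldl (fun d v => d.modify v 0 (· + d.getD u 0)) d) d

lemma push_inner_getD (L : List Int) (u : Int) (huL : u ∉ L) :
    ∀ (d : PySem.Dict Int Int) (x : Int),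
    (L.foldl (fun d v => d.modify v 0 (· + d.getD u 0)) d).getD x 0
      = d.getD x 0 + (L.count x : Int) * d.getD u 0 := by
  induction L with
  | nil => intro d x; simp
  | cons v L' ih =>
      intro d x
      have hvu : ¬ u = v := fun h => huL (by simp [h])
      rw [List.foldl_cons, ih (fun h => huL (by simp [h]))]
      have hdu : (d.modify v 0 (· + d.getD u 0)).getD u 0 = d.getD u 0 := by
        rw [PySem.Dict.getD_modify, if_neg hvu]
      rw [hdu, PySem.Dict.getD_modify]
      have hcc : (v :: L').count x = L'.count x + if x = v then 1 else 0 := by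
        rw [List.count_cons]
        by_cases h : x = v
        · subst h; simp
        · simp [h, Ne.symm h]
      rw [hcc]
      by_cases h : x = v
      · rw [if_pos h, if_pos h]
        subst h
        push_cast
        ring
      · rw [if_neg h, if_neg h]
        push_cast
        ring

lemma pushF_freeze (a : Int → List Int) (l : List Int) (x : Int)
    (hx : ∀ p ∈ l, x ∉ a p) (hself : ∀ p ∈ l, p ∉ a p) :
    ∀ d : PySem.Dict Int Int, (pushF a d l).getD x 0 = d.getD x 0 := by
  induction l with
  | nil => intro d; rfl
  | cons p t ih =>
      intro d
      show (pushF a ((a p).foldl (fun d v => d.modify v 0 (· + d.getD p 0)) d) t).getD x 0 = _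
      rw [ih (fun q hq => hx q (by simp [hq])) (fun q hq => hself q (by simp [hq]))]
      rw [push_inner_getD (a p) p (hself p (by simp))]
      have : (a p).count x = 0 := List.count_eq_zero.mpr (hx p (by simp))
      rw [this]
      simp

lemma pushF_spec (a : Int → List Int) :
    ∀ (l : List Int) (d : PySem.Dict Int Int),
    l.Nodup → l.Pairwise (fun p q => p ∉ a q) → (∀ p ∈ l, p ∉ a p) →
    ∀ x ∈ l, (pushF a d l).getD x 0
      = d.getD x 0 + (l.map (fun p => ((a p).count x : Int) * (pushF a d l).getD p 0)).sum := by
  intro l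
  induction l with
  | nil => intro d _ _ _ x hx; simp at hx
  | cons p t ih =>
      intro d hnd hpair hself x hx
      have hndt : t.Nodup := (List.nodup_cons.mp hnd).2
      have hpt : ∀ q ∈ t, p ∉ a q := fun q hq => (List.pairwise_cons.mp hpair).1 q hq
      have hpairt : t.Pairwise (fun p q => p ∉ a q) := (List.pairwise_cons.mp hpair).2
      have hselft : ∀ q ∈ t, q ∉ a q := fun q hq => hself q (by simp [hq])
      have hselfp : p ∉ a p := hself p (by simp)
      have hstep : pushF a d (p :: t)
          = pushF a ((a p).foldl (fun d v => d.modify v 0 (· + d.getD p 0)) d) t := rfl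
      have hfreeze : (pushF a d (p :: t)).getD p 0 = d.getD p 0 := by
        rw [hstep, pushF_freeze a t p hpt hselft, push_inner_getD (a p) p hselfp]
        rw [List.count_eq_zero.mpr hselfp]
        simp
      rcases List.mem_cons.mp hx with rfl | hxt
      · rw [hfreeze]
        rw [List.map_cons, List.sum_cons]
        rw [List.count_eq_zero.mpr hselfp]
        have hz : (t.map (fun q => ((a q).count x : Int) * (pushF a d (x :: t)).getD q 0)).sum
            = 0 := by
          apply List.sum_eq_zero
          intro y hy
          obtain ⟨q, hq, rfl⟩ := List.mem_map.mp hy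
          rw [List.count_eq_zero.mpr (hpt q hq)]
          simp
        rw [hz]
        simp
      · rw [hstep, ih _ hndt hpairt hselft x hxt]
        rw [push_inner_getD (a p) p hselfp]
        rw [List.map_cons, List.sum_cons]
        rw [← hstep, hfreeze]
        ring

-- bridge from the per-node-count form to the predecessor-multiset form
lemma sum_ite_single (l : List Int) (x : Int) (f : Int → Int) (hnd : l.Nodup) (hx : x ∈ l) :
    (l.map (fun p => if p = x then f p else 0)).sum = f x := by
  induction l with
  | nil => simp at hx
  | cons p t ih =>
      rw [List.map_cons, List.sum_cons]
      have hndt : t.Nodup := (List.nodup_cons.mp hnd).2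
      rcases List.mem_cons.mp hx with heq | hxt
      · subst heq
        rw [if_pos rfl]
        have hz : (t.map (fun q => if q = x then f q else 0)).sum = 0 := by
          apply List.sum_eq_zero
          intro y hy
          obtain ⟨q, hq, hqy⟩ := List.mem_map.mp hy
          rw [← hqy, if_neg (fun h : q = x => (List.nodup_cons.mp hnd).1 (h ▸ hq))]
        rw [hz]
        simp
      · have hpx : ¬ p = x := fun h => (List.nodup_cons.mp hnd).1 (h ▸ hxt)
        rw [if_neg hpx, ih hndt hxt]
        simp

lemma sum_count_mul (l : List Int) (f : Int → Int) (hnd : l.Nodup) :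
    ∀ ms : List Int, (∀ u ∈ ms, u ∈ l) →
    (ms.map f).sum = (l.map (fun p => (ms.count p : Int) * f p)).sum := by
  intro ms
  induction ms with
  | nil =>
      intro _
      rw [List.map_nil, List.sum_nil]
      symm
      apply List.sum_eq_zero
      intro y hy
      obtain ⟨q, hq, rfl⟩ := List.mem_map.mp hy
      simp
  | cons x ms' ih =>
      intro hsub
      rw [List.map_cons, List.sum_cons, ih (fun u hu => hsub u (by simp [hu]))]
      have hcc : ∀ p : Int, ((x :: ms').count p : Int) = (ms'.count p : Int)
          + (if p = x then 1 else 0) := by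
        intro p
        rw [List.count_cons]
        by_cases h : p = x
        · subst h; simp
        · simp [h, Ne.symm h]
      have hsplit : (l.map (fun p => ((x :: ms').count p : Int) * f p)).sum
          = (l.map (fun p => (ms'.count p : Int) * f p)).sum
            + (l.map (fun p => if p = x then f p else 0)).sum := by
        rw [← PySem.List.sum_map_add_int]
        apply congrArg
        apply List.map_congr_left
        intro p _
        rw [hcc p]
        by_cases h : p = x
        · rw [if_pos h, if_pos h]; ring
        · rw [if_neg h, if_neg h]; ring
      rw [hsplit, sum_ite_single l x f hnd (hsub x (by simp))]
      ring

lemma pushF_rec (a pr : Int → List Int) (hcnt : ∀ p x : Int, (a p).count x = (pr x).count p)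
    (l : List Int) (d : PySem.Dict Int Int) (hnd : l.Nodup)
    (hpair : l.Pairwise (fun p q => p ∉ a q)) (hself : ∀ p ∈ l, p ∉ a p)
    (hclose : ∀ x ∈ l, ∀ u ∈ pr x, u ∈ l) :
    ∀ x ∈ l, (pushF a d l).getD x 0
      = d.getD x 0 + ((pr x).map (fun u => (pushF a d l).getD u 0)).sum := by
  intro x hx
  rw [pushF_spec a l d hnd hpair hself x hx]
  rw [sum_count_mul l (fun u => (pushF a d l).getD u 0) hnd (pr x) (hclose x hx)]
  congr 1
  apply congrArg
  apply List.map_congr_left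
  intro p _
  rw [hcnt p x]

-- ---- B's fixpoint iteration ----

lemma preds_cons (e : Int × Int) (E : List (Int × Int)) (v : Int) :
    predsE (e :: E) v = if e.2 = v then e.1 :: predsE E v else predsE E v := by
  simp only [predsE, List.filter_cons]
  by_cases h : e.2 = v
  · simp [h]
  · simp [h]

lemma buildFold_getD (E : List (Int × Int)) (s : PySem.Dict Int Int) :
    ∀ (m0 : PySem.Dict Int Int) (v : Int),
    (E.foldl (fun m e => m.insert e.2 (m.getD e.2 0 + s.getD e.1 0)) m0).getD v 0
      = m0.getD v 0 + ((predsE E v).map (fun u => s.getD u 0)).sum := by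
  induction E with
  | nil => intro m0 v; simp [predsE]
  | cons e E' ih =>
      intro m0 v
      rw [List.foldl_cons, ih, preds_cons]
      rw [PySem.Dict.getD_insert]
      by_cases h : e.2 = v
      · rw [if_pos h, if_pos h.symm, List.map_cons, List.sum_cons]
        subst h
        ring
      · rw [if_neg h, if_neg (fun hh => h hh.symm)]

lemma pvPow_succ' {α : Type} (f : α → α) :
    ∀ (k : Nat) (s : α), pvPow f (k + 1) s = f (pvPow f k s) := by
  intro k
  induction k with
  | zero => intro s; rfl
  | succ k ih =>
      intro s
      show pvPow f (k + 1) (f s) = _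
      rw [ih (f s)]
      rfl

lemma mem_take_exists (l : List Int) (i : Nat) (u : Int) (hu : u ∈ l.take i) :
    ∃ j, ∃ hj : j < l.length, j < i ∧ l[j]'hj = u := by
  obtain ⟨j, hj, hval⟩ := List.mem_iff_getElem.mp hu
  have hlen : j < min i l.length := by simpa using hj
  have h1 : j < l.length := by omega
  refine ⟨j, h1, by omega, ?_⟩
  rw [← hval, List.getElem_take]

lemma iter_conv (E : List (Int × Int)) (l : List Int) (srcN : Int) (F : Int → Int)
    (hiv : ∀ i, (h : i < l.length) → ∀ u ∈ predsE E (l[i]'h), u ∈ l.take i)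
    (hsl : srcN ∈ l) (hsp : predsE E srcN = [])
    (huniq : ∀ v ∈ l, predsE E v = [] → v = srcN)
    (hF : ∀ x ∈ l, F x = (if x = srcN then 1 else 0) + ((predsE E x).map F).sum) :
    ∀ (k i : Nat), (h : i < l.length) → i ≤ k →
      (pvPow (fun s => (E.foldl (fun m e => m.insert e.2 (m.getD e.2 0 + s.getD e.1 0))
          PySem.Dict.empty).insert srcN 1) k
        ((PySem.Dict.empty : PySem.Dict Int Int).insert srcN 1)).getD (l[i]'h) 0
        = F (l[i]'h) := by
  have hFsrc : F srcN = 1 := by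
    rw [hF srcN hsl, hsp]
    simp
  intro k
  induction k with
  | zero =>
      intro i h hik
      have hi0 : i = 0 := by omega
      subst hi0
      have hp0 : predsE E (l[0]'h) = [] := by
        rw [List.eq_nil_iff_forall_not_mem]
        intro u hu
        have := hiv 0 h u hu
        simp at this
      have hl0 : l[0]'h = srcN := huniq _ (List.getElem_mem h) hp0
      rw [hl0]
      show ((PySem.Dict.empty : PySem.Dict Int Int).insert srcN 1).getD srcN 0 = F srcN
      rw [PySem.Dict.getD_insert_self, hFsrc]
  | succ k ih =>
      intro i h hik
      rw [pvPow_succ']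
      rw [PySem.Dict.getD_insert]
      by_cases hvs : l[i]'h = srcN
      · rw [if_pos hvs, hvs, hFsrc]
      · rw [if_neg hvs]
        rw [buildFold_getD]
        rw [PySem.Dict.getD_empty]
        have hsum : ((predsE E (l[i]'h)).map (fun u =>
            (pvPow (fun s => (E.foldl (fun m e => m.insert e.2 (m.getD e.2 0 + s.getD e.1 0))
              PySem.Dict.empty).insert srcN 1) k
              ((PySem.Dict.empty : PySem.Dict Int Int).insert srcN 1)).getD u 0)).sum
            = ((predsE E (l[i]'h)).map F).sum := by
          apply congrArg
          apply List.map_congr_left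
          intro u hu
          obtain ⟨j, hj, hji, hval⟩ := mem_take_exists l i u (hiv i h u hu)
          rw [← hval]
          exact ih j hj (by omega)
        rw [hsum, hF _ (List.getElem_mem h), if_neg hvs]

-- ---- derived facts about the final topo order ----

lemma mem_sinks_iff (E : List (Int × Int)) (v : Int) :
    v ∈ pvSinksOf E ↔ (v ∈ pvNodesOf E ∧ (pvSucc E v).length = 0) := by
  rw [pvSinksOf, List.mem_filter]
  constructor
  · rintro ⟨h1, h2⟩
    rw [count_src_eq_length_succ] at h2
    exact ⟨h1, by simpa using h2⟩
  · rintro ⟨h1, h2⟩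
    refine ⟨h1, ?_⟩
    rw [count_src_eq_length_succ]
    simpa using h2

lemma len1_eq (l : List Int) (h : l.length = 1) : l = [l.headD 0] := by
  cases l with
  | nil => simp at h
  | cons a t =>
      cases t with
      | nil => rfl
      | cons b t' => simp at h

-- an edge inside the topo list always goes from an earlier to a later position
lemma topo_edge_lt (E : List (Int × Int)) (l : List Int) (hnd : l.Nodup)
    (h6 : ∀ i, (h : i < l.length) → ∀ u ∈ predsE E (l[i]'h), u ∈ l.take i) :
    ∀ a b : Nat, (ha : a < l.length) → (hb : b < l.length) →
      (l[a]'ha) ∈ predsE E (l[b]'hb) → a < b := by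
  intro a b ha hb hmem
  obtain ⟨j, hj, hji, hval⟩ := mem_take_exists l b _ (h6 b hb _ hmem)
  have hfin : (⟨j, hj⟩ : Fin l.length) = ⟨a, ha⟩ :=
    List.nodup_iff_injective_getElem.mp hnd hval
  have : j = a := by
    simpa using congrArg Fin.val hfin
  omega

lemma topo_pairwise (E : List (Int × Int)) (l : List Int) (hnd : l.Nodup)
    (h6 : ∀ i, (h : i < l.length) → ∀ u ∈ predsE E (l[i]'h), u ∈ l.take i) :
    l.Pairwise (fun p q => p ∉ pvSucc E q) := by
  rw [List.pairwise_iff_getElem]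
  intro i j hi hj hij hmem
  have : l[j]'hj ∈ predsE E (l[i]'hi) := mem_preds_iff.mpr (mem_succ_iff.mp hmem)
  have := topo_edge_lt E l hnd h6 j i hj hi this
  omega

lemma topo_self (E : List (Int × Int)) (l : List Int) (hnd : l.Nodup)
    (h6 : ∀ i, (h : i < l.length) → ∀ u ∈ predsE E (l[i]'h), u ∈ l.take i) :
    ∀ p ∈ l, p ∉ pvSucc E p := by
  intro p hp hmem
  obtain ⟨i, hi, hval⟩ := List.mem_iff_getElem.mp hp
  have : l[i]'hi ∈ predsE E (l[i]'hi) := by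
    rw [hval]
    exact mem_preds_iff.mpr (mem_succ_iff.mp hmem)
  have := topo_edge_lt E l hnd h6 i i hi hi this
  omega

lemma mem_take_of_lt (l : List Int) (i j : Nat) (hj : j < l.length) (hji : j < i) :
    l[j]'hj ∈ l.take i := by
  have hlen : j < (l.take i).length := by simp; omega
  have := List.getElem_take (xs := l) (i := j) (j := i) (h := hlen)
  rw [← this]
  exact List.getElem_mem hlen

-- the reversed topo list is topologically sorted for the reversed graph
lemma topo_rev_iv (E : List (Int × Int)) (l : List Int) (hnd : l.Nodup)
    (h6 : ∀ i, (h : i < l.length) → ∀ u ∈ predsE E (l[i]'h), u ∈ l.take i)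
    (hsucc_mem : ∀ x ∈ l, ∀ u ∈ pvSucc E x, u ∈ l) :
    ∀ i, (h : i < l.reverse.length) →
      ∀ u ∈ pvSucc E (l.reverse[i]'h), u ∈ l.reverse.take i := by
  intro i h u hu
  have hlen : l.reverse.length = l.length := List.length_reverse
  have hb : l.length - 1 - i < l.length := by omega
  have hrw : l.reverse[i]'h = l[l.length - 1 - i]'hb := by
    rw [List.getElem_reverse]
  rw [hrw] at hu
  have huL : u ∈ l := hsucc_mem _ (List.getElem_mem hb) u hu
  obtain ⟨p, hp, hval⟩ := List.mem_iff_getElem.mp huL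
  have hedge : (l[l.length - 1 - i]'hb) ∈ predsE E (l[p]'hp) := by
    rw [hval]
    exact mem_preds_iff.mpr (mem_succ_iff.mp hu)
  have hlt := topo_edge_lt E l hnd h6 _ p hb hp hedge
  -- u = l[p] = l.reverse[l.length - 1 - p] with l.length - 1 - p < i
  have hq : l.length - 1 - p < l.reverse.length := by omega
  have hrev : l.reverse[l.length - 1 - p]'hq = l[p]'hp := by
    rw [List.getElem_reverse]
    congr 1
    omega
  rw [← hval, ← hrev]
  exact mem_take_of_lt _ i _ hq (by omega)

lemma preds_swap (E : List (Int × Int)) (v : Int) :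
    predsE (E.map (fun e => (e.2, e.1))) v = pvSucc E v := by
  simp only [predsE, pvSucc, List.filter_map, List.map_map]
  rfl

lemma succ_swap (E : List (Int × Int)) (u : Int) :
    pvSucc (E.map (fun e => (e.2, e.1))) u = predsE E u := by
  simp only [predsE, pvSucc, List.filter_map, List.map_map]
  rfl

lemma getD_insert_one (k x : Int) :
    ((PySem.Dict.empty : PySem.Dict Int Int).insert k 1).getD x 0
      = if x = k then 1 else 0 := by
  rw [PySem.Dict.getD_insert]
  by_cases h : x = k
  · rw [if_pos h, if_pos h]
  · rw [if_neg h, if_neg h, PySem.Dict.getD_empty]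

theorem pv_witness_ok :
    Dom_find_critical_edges_dag pvWitness_find_critical_edges_dag ∧
      Pre_find_critical_edges_dag pvWitness_find_critical_edges_dag := by
  decide

-- ===== VERDICT (by name: the statement is the Claim_ definition above) =====
theorem find_critical_edges_dag_spec : Claim_equal_find_critical_edges_dag := by
  intro edges hdom hpre
  obtain ⟨hs1, hk1, hacyc⟩ := hpre
  unfold Spec_find_critical_edges_dag
  have hsrcL : pvSourcesOf edges = [(pvSourcesOf edges).headD 0] := len1_eq _ hs1
  have hsnkL : pvSinksOf edges = [(pvSinksOf edges).headD 0] := len1_eq _ hk1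
  set src : Int := (pvSourcesOf edges).headD 0 with hsrcdef
  set snk : Int := (pvSinksOf edges).headD 0 with hsnkdef
  have hsrcS : src ∈ pvSourcesOf edges := by rw [hsrcL]; exact List.mem_singleton.mpr rfl
  have hsnkS : snk ∈ pvSinksOf edges := by rw [hsnkL]; exact List.mem_singleton.mpr rfl
  obtain ⟨hsrcN, hsrcP0⟩ := (mem_sources_iff edges src).mp hsrcS
  obtain ⟨hsnkN, hsnkO0⟩ := (mem_sinks_iff edges snk).mp hsnkS
  have hsrcP : predsE edges src = [] := List.eq_nil_of_length_eq_zero hsrcP0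
  have hsnkSucc : pvSucc edges snk = [] := List.eq_nil_of_length_eq_zero hsnkO0
  have hadj : ∀ u : Int, (edges.foldl (fun d e => d.modify e.1 [] (· ++ [e.2]))
      (PySem.Dict.empty : PySem.Dict Int (List Int))).getD u [] = pvSucc edges u :=
    adj_getD edges
  obtain ⟨topoF, indegF, hKahn, hinvF⟩ :=
    kahn_go edges _ hadj ((pvNodesOf edges).length + 2) [] [src] (pvDegNodes edges).1
      (kinv_init edges src hsrcL) (by simp)
  have hcompl := kinv_complete edges hacyc hinvF
  have hlenle := kinv_topo_le edges hinvF
  obtain ⟨hnd1, hmem2, h3F, _, h5F, h6F⟩ := hinvF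
  have htnd : topoF.Nodup := by simpa using hnd1
  have hsubn : ∀ v ∈ topoF, v ∈ pvNodesOf edges := by
    intro v hv
    exact hmem2 v (by simpa using hv)
  -- ---- A's src sweep satisfies the path-count recurrence ----
  have hpairS := topo_pairwise edges topoF htnd h6F
  have hselfS := topo_self edges topoF htnd h6F
  have hcloseS : ∀ x ∈ topoF, ∀ u ∈ predsE edges x, u ∈ topoF :=
    fun x _ u hu => hcompl u (mem_nodes_left (mem_preds_iff.mp hu))
  have hArec := pushF_rec (pvSucc edges) (predsE edges)
    (fun p x => count_succ_eq_count_preds edges p x) topoF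
    ((PySem.Dict.empty : PySem.Dict Int Int).insert src 1) htnd hpairS hselfS hcloseS
  have hFsrc : ∀ x ∈ topoF,
      (fun y => (pushF (pvSucc edges)
          ((PySem.Dict.empty : PySem.Dict Int Int).insert src 1) topoF).getD y 0) x
        = (if x = src then 1 else 0)
          + ((predsE edges x).map (fun y => (pushF (pvSucc edges)
              ((PySem.Dict.empty : PySem.Dict Int Int).insert src 1) topoF).getD y 0)).sum := by
    intro x hx
    show (pushF (pvSucc edges) _ topoF).getD x 0 = _
    rw [hArec x hx, getD_insert_one]
  have huniqS : ∀ v ∈ topoF, predsE edges v = [] → v = src := by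
    intro v hv hp
    have hvS : v ∈ pvSourcesOf edges :=
      (mem_sources_iff edges v).mpr ⟨hsubn v hv, by rw [hp]; rfl⟩
    rw [hsrcL] at hvS
    simpa using hvS
  have hsrcT : src ∈ topoF := hcompl src hsrcN
  have hSval : ∀ v ∈ pvNodesOf edges,
      (pvPow (fun s => (edges.foldl (fun m e => m.insert e.2 (m.getD e.2 0 + s.getD e.1 0))
          PySem.Dict.empty).insert src 1) (pvNodesOf edges).length
        ((PySem.Dict.empty : PySem.Dict Int Int).insert src 1)).getD v 0
      = (pushF (pvSucc edges)
          ((PySem.Dict.empty : PySem.Dict Int Int).insert src 1) topoF).getD v 0 := by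
    intro v hv
    obtain ⟨i, hi, hval⟩ := List.mem_iff_getElem.mp (hcompl v hv)
    rw [← hval]
    exact iter_conv edges topoF src _ h6F hsrcT hsrcP huniqS hFsrc
      (pvNodesOf edges).length i hi (by omega)
  -- ---- A's dest sweep, as the src sweep of the edge-reversed graph ----
  have hndR : topoF.reverse.Nodup := List.nodup_reverse.mpr htnd
  have hsuccmem : ∀ x ∈ topoF, ∀ u ∈ pvSucc edges x, u ∈ topoF :=
    fun x _ u hu => hcompl u (mem_nodes_right (mem_succ_iff.mp hu))
  have hivR0 := topo_rev_iv edges topoF htnd h6F hsuccmem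
  have hivR : ∀ i, (h : i < topoF.reverse.length) →
      ∀ u ∈ predsE (edges.map (fun e => (e.2, e.1))) (topoF.reverse[i]'h),
        u ∈ topoF.reverse.take i := by
    intro i h u hu
    rw [preds_swap] at hu
    exact hivR0 i h u hu
  have hpairD := topo_pairwise (edges.map (fun e => (e.2, e.1))) topoF.reverse hndR hivR
  have hselfD := topo_self (edges.map (fun e => (e.2, e.1))) topoF.reverse hndR hivR
  have hcloseD : ∀ x ∈ topoF.reverse, ∀ u ∈ predsE (edges.map (fun e => (e.2, e.1))) x,
      u ∈ topoF.reverse := by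
    intro x hx u hu
    rw [preds_swap] at hu
    exact List.mem_reverse.mpr (hsuccmem x (List.mem_reverse.mp hx) u hu)
  have hDrec := pushF_rec (pvSucc (edges.map (fun e => (e.2, e.1))))
      (predsE (edges.map (fun e => (e.2, e.1))))
      (fun p x => count_succ_eq_count_preds _ p x) topoF.reverse
      ((PySem.Dict.empty : PySem.Dict Int Int).insert snk 1) hndR hpairD hselfD hcloseD
  have hFdst : ∀ x ∈ topoF.reverse,
      (fun y => (pushF (pvSucc (edges.map (fun e => (e.2, e.1))))
          ((PySem.Dict.empty : PySem.Dict Int Int).insert snk 1) topoF.reverse).getD y 0) x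
        = (if x = snk then 1 else 0)
          + ((predsE (edges.map (fun e => (e.2, e.1))) x).map
              (fun y => (pushF (pvSucc (edges.map (fun e => (e.2, e.1))))
                ((PySem.Dict.empty : PySem.Dict Int Int).insert snk 1) topoF.reverse).getD y 0)).sum := by
    intro x hx
    show (pushF _ _ topoF.reverse).getD x 0 = _
    rw [hDrec x hx, getD_insert_one]
  have huniqD : ∀ v ∈ topoF.reverse, predsE (edges.map (fun e => (e.2, e.1))) v = [] → v = snk := by
    intro v hv hp
    rw [preds_swap] at hp
    have hvS : v ∈ pvSinksOf edges :=
      (mem_sinks_iff edges v).mpr ⟨hsubn v (List.mem_reverse.mp hv), by rw [hp]; rfl⟩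
    rw [hsnkL] at hvS
    simpa using hvS
  have hsnkP : predsE (edges.map (fun e => (e.2, e.1))) snk = [] := by
    rw [preds_swap]; exact hsnkSucc
  have hsnkRT : snk ∈ topoF.reverse := List.mem_reverse.mpr (hcompl snk hsnkN)
  have hDval : ∀ v ∈ pvNodesOf edges,
      (pvPow (fun s => ((edges.map (fun e => (e.2, e.1))).foldl
          (fun m e => m.insert e.2 (m.getD e.2 0 + s.getD e.1 0))
          PySem.Dict.empty).insert snk 1) (pvNodesOf edges).length
        ((PySem.Dict.empty : PySem.Dict Int Int).insert snk 1)).getD v 0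
      = (pushF (pvSucc (edges.map (fun e => (e.2, e.1))))
          ((PySem.Dict.empty : PySem.Dict Int Int).insert snk 1) topoF.reverse).getD v 0 := by
    intro v hv
    obtain ⟨i, hi, hval⟩ := List.mem_iff_getElem.mp (List.mem_reverse.mpr (hcompl v hv))
    rw [← hval]
    refine iter_conv (edges.map (fun e => (e.2, e.1))) topoF.reverse snk _ hivR hsnkRT hsnkP
      huniqD hFdst (pvNodesOf edges).length i hi ?_
    rw [List.length_reverse] at hi
    omega
  -- ---- evaluate both ports under the validation condition ----
  have hsrcfold : topoF.foldl (fun d u =>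
        ((edges.foldl (fun d e => d.modify e.1 [] (· ++ [e.2]))
          (PySem.Dict.empty : PySem.Dict Int (List Int))).getD u []).foldl
          (fun d v => d.modify v 0 (· + d.getD u 0)) d)
      ((PySem.Dict.empty : PySem.Dict Int Int).insert src 1)
      = pushF (pvSucc edges) ((PySem.Dict.empty : PySem.Dict Int Int).insert src 1) topoF := by
    unfold pushF
    apply PySem.List.foldl_congr_mem
    intro acc u _
    rw [hadj u]
  have hdstfold : topoF.reverse.foldl (fun d u =>
        ((edges.foldl (fun d e => d.modify e.2 [] (· ++ [e.1]))
          (PySem.Dict.empty : PySem.Dict Int (List Int))).getD u []).foldl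
          (fun d v => d.modify v 0 (· + d.getD u 0)) d)
      ((PySem.Dict.empty : PySem.Dict Int Int).insert snk 1)
      = pushF (pvSucc (edges.map (fun e => (e.2, e.1))))
          ((PySem.Dict.empty : PySem.Dict Int Int).insert snk 1) topoF.reverse := by
    unfold pushF
    apply PySem.List.foldl_congr_mem
    intro acc u _
    rw [rev_getD edges u, ← succ_swap]
  have hA : find_critical_edges_dag edges
      = edges.foldl (fun acc e =>
          if ((pushF (pvSucc edges)
                ((PySem.Dict.empty : PySem.Dict Int Int).insert src 1) topoF).getD e.1 0
              * (pushF (pvSucc (edges.map (fun e => (e.2, e.1))))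
                ((PySem.Dict.empty : PySem.Dict Int Int).insert snk 1) topoF.reverse).getD e.2 0
              == (pushF (pvSucc edges)
                ((PySem.Dict.empty : PySem.Dict Int Int).insert src 1) topoF).getD snk 0)
          then acc ++ [e] else acc) [] := by
    simp only [find_critical_edges_dag]
    rw [sources_eq, sinks_eq, nodes_set_eq]
    rw [if_pos ⟨hs1, hk1⟩]
    rw [hKahn]
    rw [hsrcfold, hdstfold]
  have hB : find_critical_edges_dag_alt edges
      = edges.filter (fun e =>
          (pvPow (fun s => (edges.foldl (fun m e => m.insert e.2 (m.getD e.2 0 + s.getD e.1 0))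
              PySem.Dict.empty).insert src 1) (pvNodesOf edges).length
            ((PySem.Dict.empty : PySem.Dict Int Int).insert src 1)).getD e.1 0
          * (pvPow (fun s => (edges.foldl (fun m e => m.insert e.1 (m.getD e.1 0 + s.getD e.2 0))
              PySem.Dict.empty).insert snk 1) (pvNodesOf edges).length
            ((PySem.Dict.empty : PySem.Dict Int Int).insert snk 1)).getD e.2 0
          == (pvPow (fun s => (edges.foldl (fun m e => m.insert e.2 (m.getD e.2 0 + s.getD e.1 0))
              PySem.Dict.empty).insert src 1) (pvNodesOf edges).length
            ((PySem.Dict.empty : PySem.Dict Int Int).insert src 1)).getD snk 0) := by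
    simp only [find_critical_edges_dag_alt]
    rw [sources_eq, sinks_eq, nodes_set_eq]
    rw [if_pos ⟨hs1, hk1⟩]
  have hfoldswap : (fun (s : PySem.Dict Int Int) =>
        ((edges.map (fun e => (e.2, e.1))).foldl
          (fun m e => m.insert e.2 (m.getD e.2 0 + s.getD e.1 0)) PySem.Dict.empty).insert snk 1)
      = (fun (s : PySem.Dict Int Int) =>
        (edges.foldl (fun m e => m.insert e.1 (m.getD e.1 0 + s.getD e.2 0))
          PySem.Dict.empty).insert snk 1) := by
    funext s
    rw [List.foldl_map]
  rw [hA, hB, PySem.List.foldl_append_if_eq_filter, List.nil_append]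
  apply List.filter_congr
  intro e he
  have he' : (e.1, e.2) ∈ edges := by simpa using he
  have h1n : e.1 ∈ pvNodesOf edges := mem_nodes_left he'
  have h2n : e.2 ∈ pvNodesOf edges := mem_nodes_right he'
  rw [hSval e.1 h1n, hSval snk hsnkN, ← hfoldswap, hDval e.2 h2n]
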